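-- pv_equiv track=rewrite | github.com/madulinux/ocr-ktp-py | utils/predict_fixed_string.py | status_kawin
-- ===== SOURCE A (Python) =====
-- def status_kawin(content: str) -> str:
--     list_status = content.split(" ")
--     new_list_status = []
--     pernah_list = ["per", "rna", "nah"]
--     belum_list = ["bel", "elu", "lum"]
--     kawin_list = ["kaw", "awi", "win"]
--     for status in list_status:
--         status_lower = status.lower()
--         if any(pernah in status_lower for pernah in pernah_list):
--             new_list_status.append("PERNAH")
--         elif any(belum in status_lower for belum in belum_list):
--             new_list_status.append("BELUM")
--         elif any(kawin in status_lower for kawin in kawin_list):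
--             new_list_status.append("KAWIN")
--
--     new_status = " ".join(new_list_status)
--
--     if "PERNAH" in new_status:
--         return "PERNAH KAWIN"
--     if "BELUM" in new_status:
--         return "BELUM KAWIN"
--
--     return "KAWIN" if "KAWIN" in new_status else ""
-- ===== SOURCE B (Python) =====
-- def status_kawin(content: str) -> str:
--     # The patterns contain no space, so a pattern occurs in some split word
--     # iff it occurs in the whole lowered string: check the groups directly
--     # in priority order, no per-word loop, no marker list, no join.
--     lowered = content.lower()
--     if any(p in lowered for p in ("per", "rna", "nah")):
--         return "PERNAH KAWIN"
--     if any(p in lowered for p in ("bel", "elu", "lum")):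
--         return "BELUM KAWIN"
--     if any(p in lowered for p in ("kaw", "awi", "win")):
--         return "KAWIN"
--     return ""
-- ===== Notes on version B (the rewrite author's own statement) =====
-- stated objective: simpler
-- what changed: B lowercases the whole string once and tests the nine 3-char patterns directly on it in priority order, eliminating A's word split, the per-word marker accumulation and the join-then-substring step (space-free patterns match a split word iff they match the whole string).
import Mathlib
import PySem

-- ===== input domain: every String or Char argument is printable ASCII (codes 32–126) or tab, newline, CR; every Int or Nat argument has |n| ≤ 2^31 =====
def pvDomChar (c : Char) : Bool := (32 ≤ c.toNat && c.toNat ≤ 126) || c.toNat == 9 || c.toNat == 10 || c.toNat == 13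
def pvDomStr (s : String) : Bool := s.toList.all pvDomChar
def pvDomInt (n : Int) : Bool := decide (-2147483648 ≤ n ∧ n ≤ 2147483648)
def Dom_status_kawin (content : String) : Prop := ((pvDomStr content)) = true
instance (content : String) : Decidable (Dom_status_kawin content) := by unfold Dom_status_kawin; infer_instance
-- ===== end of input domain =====

-- B replaces A's split/per-word-markers/join pipeline by direct substring tests on the
-- whole lowered string (objective: simpler).

-- ===== PORT A =====
def status_kawin (content : String) : String :=
  let list_status := (PySem.Str.split? content " ").getD []  -- sep " " ≠ "": never none
  let pernah_list := ["per", "rna", "nah"]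
  let belum_list := ["bel", "elu", "lum"]
  let kawin_list := ["kaw", "awi", "win"]
  let new_list_status := list_status.foldl (fun acc status =>
    let status_lower := PySem.Str.lower status
    if pernah_list.any (fun pernah => PySem.Str.isIn pernah status_lower) then
      acc ++ ["PERNAH"]
    else if belum_list.any (fun belum => PySem.Str.isIn belum status_lower) then
      acc ++ ["BELUM"]
    else if kawin_list.any (fun kawin => PySem.Str.isIn kawin status_lower) then
      acc ++ ["KAWIN"]
    else acc) []
  let new_status := PySem.Str.join " " new_list_status
  if PySem.Str.isIn "PERNAH" new_status then "PERNAH KAWIN"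
  else if PySem.Str.isIn "BELUM" new_status then "BELUM KAWIN"
  else if PySem.Str.isIn "KAWIN" new_status then "KAWIN"
  else ""

-- ===== PORT B =====
def status_kawin_alt (content : String) : String :=
  let lowered := PySem.Str.lower content
  if ["per", "rna", "nah"].any (fun p => PySem.Str.isIn p lowered) then "PERNAH KAWIN"
  else if ["bel", "elu", "lum"].any (fun p => PySem.Str.isIn p lowered) then "BELUM KAWIN"
  else if ["kaw", "awi", "win"].any (fun p => PySem.Str.isIn p lowered) then "KAWIN"
  else ""

-- ===== PRECONDITION & SPEC =====
def Spec_status_kawin (content : String) (out : String) : Prop := out = status_kawin_alt content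
instance (content : String) (out : String) : Decidable (Spec_status_kawin content out) := by unfold Spec_status_kawin; infer_instance

-- ===== CLAIM (what is proved, stated in full; the proofs are below) =====
def Claim_equal_status_kawin : Prop := ∀ (content : String), Dom_status_kawin content → Spec_status_kawin content (status_kawin content)

-- ===== LEMMAS AND PROOFS =====

def pvSp (cur : List Char) : List Char → List (List Char)
  | [] => [cur.reverse]
  | c :: rest => if c = ' ' then cur.reverse :: pvSp [] rest else pvSp (c :: cur) rest

theorem pvSp_ne_nil (l cur : List Char) : pvSp cur l ≠ [] := by
  cases l with
  | nil => simp [pvSp]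
  | cons c rest =>
    by_cases h : c = ' '
    · simp [pvSp, h]
    · simp only [pvSp, if_neg h]
      exact pvSp_ne_nil rest (c :: cur)

theorem pvGo_eq_pvSp (l : List Char) (fuel : Nat) (cur : List Char) (acc : List (List Char))
    (h : l.length ≤ fuel) :
    PySem.Chars.splitOn.go [' '] fuel l cur acc = acc.reverse ++ pvSp cur l := by
  induction l generalizing fuel cur acc with
  | nil =>
    cases fuel with
    | zero => simp [PySem.Chars.splitOn.go, pvSp]
    | succ n => simp [PySem.Chars.splitOn.go, pvSp]
  | cons c rest ih =>
    cases fuel with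
    | zero => simp at h
    | succ n =>
      by_cases hc : c = ' '
      · have hpre : [' '].isPrefixOf (c :: rest) = true := by simp [hc, List.isPrefixOf]
        simp only [PySem.Chars.splitOn.go, hpre, if_pos, List.length_cons, List.length_nil,
          List.drop_succ_cons, List.drop_zero]
        rw [ih n [] (cur.reverse :: acc) (by simpa using Nat.le_of_succ_le_succ h)]
        simp [pvSp, hc]
      · have hpre : [' '].isPrefixOf (c :: rest) = false := by
          simp [List.isPrefixOf]; exact fun hh => hc hh.symm
        simp only [PySem.Chars.splitOn.go, hpre]
        rw [if_neg (by simp)]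
        rw [ih n (c :: cur) acc (by simpa using Nat.le_of_succ_le_succ h)]
        simp [pvSp, hc]

theorem pvSplitOn_eq_pvSp (cs : List Char) : PySem.Chars.splitOn cs [' '] = pvSp [] cs := by
  have := pvGo_eq_pvSp cs (cs.length + 1) [] [] (by omega)
  simpa [PySem.Chars.splitOn] using this

theorem pvJoin_pvSp (l cur : List Char) :
    PySem.Chars.join [' '] (pvSp cur l) = cur.reverse ++ l := by
  induction l generalizing cur with
  | nil => simp [pvSp, PySem.Chars.join_singleton]
  | cons c rest ih =>
    by_cases hc : c = ' '
    · subst hc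
      obtain ⟨b, t, hbt⟩ : ∃ b t, pvSp [] rest = b :: t := by
        cases hh : pvSp [] rest with
        | nil => exact absurd hh (pvSp_ne_nil rest [])
        | cons b t => exact ⟨b, t, rfl⟩
      rw [show pvSp cur (' ' :: rest) = cur.reverse :: pvSp [] rest from by simp [pvSp]]
      rw [hbt, PySem.Chars.join_cons_cons, ← hbt, ih []]
      simp
    · rw [show pvSp cur (c :: rest) = pvSp (c :: cur) rest from by simp [pvSp, hc]]
      rw [ih (c :: cur)]
      simp

theorem pvLower_join (parts : List (List Char)) :
    PySem.Chars.lower (PySem.Chars.join [' '] parts)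
      = PySem.Chars.join [' '] (parts.map PySem.Chars.lower) := by
  induction parts with
  | nil => simp [PySem.Chars.join, PySem.Chars.lower, List.intercalate]
  | cons a t ih =>
    cases t with
    | nil => simp [PySem.Chars.join_singleton]
    | cons b t' =>
      simp only [List.map_cons, PySem.Chars.join_cons_cons]
      rw [← List.map_cons, ← ih]
      simp [PySem.Chars.lower, PySem.Chars.lowerChar, PySem.Chars.isupper]

theorem pvPrefix_mid (u p v : List Char) (hs : ' ' ∉ p) (h : p <+: u ++ ' ' :: v) : p <+: u := by
  induction u generalizing p with
  | nil =>
    cases p with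
    | nil => exact List.nil_prefix
    | cons q qs =>
      rw [List.nil_append, List.cons_prefix_cons] at h
      exact absurd (h.1 ▸ List.mem_cons_self) hs
  | cons a u' ih =>
    cases p with
    | nil => exact List.nil_prefix
    | cons q qs =>
      rw [List.cons_append, List.cons_prefix_cons] at h
      have := ih qs (fun hm => hs (List.mem_cons_of_mem _ hm)) h.2
      exact h.1 ▸ List.cons_prefix_cons.mpr ⟨rfl, this⟩

theorem pvInfix_mid (p u v : List Char) (hp : p ≠ []) (hs : ' ' ∉ p) :
    p <:+: u ++ ' ' :: v ↔ p <:+: u ∨ p <:+: v := by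
  constructor
  · intro h
    induction u with
    | nil =>
      rw [List.nil_append, List.infix_cons_iff] at h
      rcases h with h | h
      · have := pvPrefix_mid [] p v hs h
        simp at this; exact absurd this hp
      · exact Or.inr h
    | cons a u' ih =>
      rw [List.cons_append, List.infix_cons_iff] at h
      rcases h with h | h
      · exact Or.inl ((pvPrefix_mid (a :: u') p v hs (by simpa using h)).isInfix)
      · rcases ih h with h' | h'
        · exact Or.inl (List.infix_cons h')
        · exact Or.inr h'
  · rintro (⟨s, t, hst⟩ | ⟨s, t, hst⟩)
    · exact ⟨s, t ++ ' ' :: v, by rw [← hst]; simp⟩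
    · exact ⟨u ++ ' ' :: s, t, by rw [← hst]; simp⟩

theorem pvInfix_join (p : List Char) (parts : List (List Char)) (hp : p ≠ []) (hs : ' ' ∉ p) :
    p <:+: PySem.Chars.join [' '] parts ↔ ∃ w ∈ parts, p <:+: w := by
  induction parts with
  | nil => simp [PySem.Chars.join, List.intercalate, hp]
  | cons a t ih =>
    cases t with
    | nil => simp [PySem.Chars.join_singleton]
    | cons b t' =>
      rw [PySem.Chars.join_cons_cons, List.append_assoc, List.singleton_append,
        pvInfix_mid p a _ hp hs, ih]
      simp

def pvPm (w : List Char) : Bool :=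
  PySem.Chars.isIn ['p','e','r'] (PySem.Chars.lower w) ||
  PySem.Chars.isIn ['r','n','a'] (PySem.Chars.lower w) ||
  PySem.Chars.isIn ['n','a','h'] (PySem.Chars.lower w)
def pvBm (w : List Char) : Bool :=
  PySem.Chars.isIn ['b','e','l'] (PySem.Chars.lower w) ||
  PySem.Chars.isIn ['e','l','u'] (PySem.Chars.lower w) ||
  PySem.Chars.isIn ['l','u','m'] (PySem.Chars.lower w)
def pvKm (w : List Char) : Bool :=
  PySem.Chars.isIn ['k','a','w'] (PySem.Chars.lower w) ||
  PySem.Chars.isIn ['a','w','i'] (PySem.Chars.lower w) ||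
  PySem.Chars.isIn ['w','i','n'] (PySem.Chars.lower w)

def pvMarkC (w : List Char) : List (List Char) :=
  if pvPm w then [['P','E','R','N','A','H']]
  else if pvBm w then [['B','E','L','U','M']]
  else if pvKm w then [['K','A','W','I','N']]
  else []

-- step 1: the loop builds the marker flatMap (String level)
theorem pvFold_eq (l : List String) (acc : List String) :
    l.foldl (fun acc status =>
      let status_lower := PySem.Str.lower status
      if ["per", "rna", "nah"].any (fun pernah => PySem.Str.isIn pernah status_lower) then
        acc ++ ["PERNAH"]
      else if ["bel", "elu", "lum"].any (fun belum => PySem.Str.isIn belum status_lower) then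
        acc ++ ["BELUM"]
      else if ["kaw", "awi", "win"].any (fun kawin => PySem.Str.isIn kawin status_lower) then
        acc ++ ["KAWIN"]
      else acc) acc
    = acc ++ l.flatMap (fun s => (pvMarkC s.toList).map String.ofList) := by
  have hstep : (fun (acc : List String) (status : String) =>
      let status_lower := PySem.Str.lower status
      if ["per", "rna", "nah"].any (fun pernah => PySem.Str.isIn pernah status_lower) then
        acc ++ ["PERNAH"]
      else if ["bel", "elu", "lum"].any (fun belum => PySem.Str.isIn belum status_lower) then
        acc ++ ["BELUM"]
      else if ["kaw", "awi", "win"].any (fun kawin => PySem.Str.isIn kawin status_lower) then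
        acc ++ ["KAWIN"]
      else acc)
      = fun acc status => acc ++ (pvMarkC status.toList).map String.ofList := by
    funext acc status
    have hb : ∀ (a b c : String),
        ([a, b, c].any (fun p => PySem.Str.isIn p (PySem.Str.lower status)))
        = (PySem.Chars.isIn a.toList (PySem.Chars.lower status.toList) ||
           PySem.Chars.isIn b.toList (PySem.Chars.lower status.toList) ||
           PySem.Chars.isIn c.toList (PySem.Chars.lower status.toList)) := by
      intro a b c
      simp [PySem.Str.isIn_eq, PySem.Str.toList_lower, Bool.or_assoc]
    simp only [hb, pvMarkC, pvPm, pvBm, pvKm]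
    split_ifs with h1 h2 h3 <;> simp_all
  rw [hstep, PySem.List.foldl_append_eq_flatMap]

-- marker membership characterizations
theorem pvMark_pernah (w : List Char) :
    (∃ m ∈ pvMarkC w, ['P','E','R','N','A','H'] <:+: m) ↔ pvPm w = true := by
  unfold pvMarkC; split_ifs with h1 h2 h3 <;> simp_all <;> decide

theorem pvMark_belum (w : List Char) :
    (∃ m ∈ pvMarkC w, ['B','E','L','U','M'] <:+: m) ↔ (pvPm w = false ∧ pvBm w = true) := by
  unfold pvMarkC; split_ifs with h1 h2 h3 <;> simp_all <;> decide

theorem pvMark_kawin (w : List Char) :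
    (∃ m ∈ pvMarkC w, ['K','A','W','I','N'] <:+: m) ↔ (pvPm w = false ∧ pvBm w = false ∧ pvKm w = true) := by
  unfold pvMarkC; split_ifs with h1 h2 h3 <;> simp_all <;> decide

-- the B-side condition: a 3-char no-space pattern in the whole lowered string
theorem pvWhole (pat : List Char) (hp : pat ≠ []) (hs : ' ' ∉ pat) (cs : List Char) :
    PySem.Chars.isIn pat (PySem.Chars.lower cs) = true ↔
      ∃ w ∈ pvSp [] cs, pat <:+: PySem.Chars.lower w := by
  rw [PySem.Chars.isIn_iff_infix]
  conv_lhs => rw [show cs = PySem.Chars.join [' '] (pvSp [] cs) from (by simpa using (pvJoin_pvSp cs []).symm)]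
  rw [pvLower_join, pvInfix_join pat _ hp hs]
  simp

-- the A-side condition: a marker string inside the joined marker list
theorem pvJoined (pat : List Char) (hp : pat ≠ []) (hs : ' ' ∉ pat) (ws : List (List Char)) :
    PySem.Chars.isIn pat (PySem.Chars.join [' '] (ws.flatMap pvMarkC)) = true ↔
      ∃ w ∈ ws, ∃ m ∈ pvMarkC w, pat <:+: m := by
  rw [PySem.Chars.isIn_iff_infix, pvInfix_join pat _ hp hs]
  simp [List.mem_flatMap]
  tauto

def pvAnswer (ws : List (List Char)) : String :=
  if ws.any pvPm then "PERNAH KAWIN"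
  else if ws.any pvBm then "BELUM KAWIN"
  else if ws.any pvKm then "KAWIN"
  else ""

theorem pvA_eq (content : String) :
    status_kawin content = pvAnswer (pvSp [] content.toList) := by
  have hsplit : (PySem.Str.split? content " ").getD []
      = (pvSp [] content.toList).map String.ofList := by
    rw [PySem.Str.split?, PySem.Chars.split?, show (" ".toList) = [' '] from rfl]
    rw [if_neg (by decide), pvSplitOn_eq_pvSp]
    simp
  simp only [status_kawin]
  rw [hsplit, pvFold_eq, List.nil_append, List.flatMap_map]
  simp only [String.toList_ofList]
  set ws := pvSp [] content.toList with hws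
  set NL := ws.flatMap (fun w => (pvMarkC w).map String.ofList) with hNL
  have hNLtoList : NL.map String.toList = ws.flatMap pvMarkC := by
    rw [hNL, List.map_flatMap]
    simp [List.map_map, Function.comp_def]
  have hjoin : ∀ pat : String, PySem.Str.isIn pat (PySem.Str.join " " NL)
      = PySem.Chars.isIn pat.toList (PySem.Chars.join [' '] (ws.flatMap pvMarkC)) := by
    intro pat
    rw [PySem.Str.isIn_eq, PySem.Str.toList_join, hNLtoList,
      show " ".toList = [' '] from rfl]
  by_cases hP : ws.any pvPm = true
  · obtain ⟨w, hw, hpm⟩ := List.any_eq_true.mp hP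
    have hc1 : PySem.Str.isIn "PERNAH" (PySem.Str.join " " NL) = true := by
      rw [hjoin]
      exact (pvJoined ['P','E','R','N','A','H'] (by decide) (by decide) ws).mpr ⟨w, hw, (pvMark_pernah w).mpr hpm⟩
    rw [hc1]; simp [pvAnswer, hP]
  · have hPf : ∀ w ∈ ws, pvPm w = false := by
      intro w hw
      by_contra hh
      exact hP (List.any_eq_true.mpr ⟨w, hw, by simpa using hh⟩)
    have hc1 : PySem.Str.isIn "PERNAH" (PySem.Str.join " " NL) = false := by
      rw [hjoin]
      by_contra hh
      obtain ⟨w, hw, hm⟩ := (pvJoined ['P','E','R','N','A','H'] (by decide) (by decide) ws).mp (by simpa using hh)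
      exact absurd ((pvMark_pernah w).mp hm) (by simp [hPf w hw])
    by_cases hB : ws.any pvBm = true
    · obtain ⟨w, hw, hbm⟩ := List.any_eq_true.mp hB
      have hc2 : PySem.Str.isIn "BELUM" (PySem.Str.join " " NL) = true := by
        rw [hjoin]
        exact (pvJoined ['B','E','L','U','M'] (by decide) (by decide) ws).mpr
          ⟨w, hw, (pvMark_belum w).mpr ⟨hPf w hw, hbm⟩⟩
      rw [hc1, hc2]
      simp only [Bool.not_eq_true] at hP
      simp [pvAnswer, hP, hB]
    · have hBf : ∀ w ∈ ws, pvBm w = false := by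
        intro w hw
        by_contra hh
        exact hB (List.any_eq_true.mpr ⟨w, hw, by simpa using hh⟩)
      have hc2 : PySem.Str.isIn "BELUM" (PySem.Str.join " " NL) = false := by
        rw [hjoin]
        by_contra hh
        obtain ⟨w, hw, hm⟩ := (pvJoined ['B','E','L','U','M'] (by decide) (by decide) ws).mp (by simpa using hh)
        exact absurd ((pvMark_belum w).mp hm).2 (by simp [hBf w hw])
      by_cases hK : ws.any pvKm = true
      · obtain ⟨w, hw, hkm⟩ := List.any_eq_true.mp hK
        have hc3 : PySem.Str.isIn "KAWIN" (PySem.Str.join " " NL) = true := by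
          rw [hjoin]
          exact (pvJoined ['K','A','W','I','N'] (by decide) (by decide) ws).mpr
            ⟨w, hw, (pvMark_kawin w).mpr ⟨hPf w hw, hBf w hw, hkm⟩⟩
        rw [hc1, hc2, hc3]
        simp only [Bool.not_eq_true] at hP hB
        simp [pvAnswer, hP, hB, hK]
      · have hc3 : PySem.Str.isIn "KAWIN" (PySem.Str.join " " NL) = false := by
          rw [hjoin]
          by_contra hh
          obtain ⟨w, hw, hm⟩ := (pvJoined ['K','A','W','I','N'] (by decide) (by decide) ws).mp (by simpa using hh)
          exact hK (List.any_eq_true.mpr ⟨w, hw, ((pvMark_kawin w).mp hm).2.2⟩)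
        rw [hc1, hc2, hc3]
        simp only [Bool.not_eq_true] at hP hB hK
        simp [pvAnswer, hP, hB, hK]

theorem pvB_eq (content : String) :
    status_kawin_alt content = pvAnswer (pvSp [] content.toList) := by
  simp only [status_kawin_alt, pvAnswer]
  have hone : ∀ pat : String, pat.toList ≠ [] → ' ' ∉ pat.toList →
      (PySem.Str.isIn pat (PySem.Str.lower content) = true ↔
        ∃ w ∈ pvSp [] content.toList, pat.toList <:+: PySem.Chars.lower w) := by
    intro pat h1 h2
    rw [PySem.Str.isIn_eq, PySem.Str.toList_lower]
    exact pvWhole pat.toList h1 h2 content.toList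
  set ws := pvSp [] content.toList with hws
  have h3 : ∀ (a b c : String), a.toList ≠ [] → ' ' ∉ a.toList → b.toList ≠ [] → ' ' ∉ b.toList →
      c.toList ≠ [] → ' ' ∉ c.toList →
      (([a, b, c].any (fun p => PySem.Str.isIn p (PySem.Str.lower content)))
        = ws.any (fun w => PySem.Chars.isIn a.toList (PySem.Chars.lower w) ||
            PySem.Chars.isIn b.toList (PySem.Chars.lower w) ||
            PySem.Chars.isIn c.toList (PySem.Chars.lower w))) := by
    intro a b c ha1 ha2 hb1 hb2 hc1 hc2
    rw [Bool.eq_iff_iff]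
    simp only [List.any_cons, List.any_nil, Bool.or_false, Bool.or_eq_true,
      List.any_eq_true, hone a ha1 ha2, hone b hb1 hb2, hone c hc1 hc2,
      PySem.Chars.isIn_iff_infix]
    aesop
  rw [h3 "per" "rna" "nah" (by decide) (by decide) (by decide) (by decide) (by decide) (by decide),
      h3 "bel" "elu" "lum" (by decide) (by decide) (by decide) (by decide) (by decide) (by decide),
      h3 "kaw" "awi" "win" (by decide) (by decide) (by decide) (by decide) (by decide) (by decide)]
  rfl

-- ===== VERDICT (by name: the statement is the Claim_ definition above) =====
theorem status_kawin_spec : Claim_equal_status_kawin := by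
  intro content _
  unfold Spec_status_kawin
  rw [pvA_eq, pvB_eq]
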